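-- pv_equiv track=rewrite | github.com/nexusbayarea/lostbobo | ci/dag_compiler.py | match_modules
-- ===== SOURCE A (Python) =====
-- def match_modules(files, graph):
--     affected = set()
--     for f in files:
--         for module, data in graph.items():
--             for path in data.get("paths", []):
--                 if f.startswith(path):
--                     affected.add(module)
--                     break
--     return affected
-- ===== SOURCE B (Python) =====
-- def match_modules(files, graph):
--     # per-module path sets built once; each file contributes the set of its prefixes
--     # (capped by the longest path), matched against each module by set disjointness
--     path_sets = [(module, frozenset(data.get("paths", []))) for module, data in graph.items()]
--     maxlen = max((len(p) for _, paths in path_sets for p in paths), default=-1)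
--     affected = set()
--     for f in files:
--         prefixes = frozenset(f[:i] for i in range(min(len(f), maxlen) + 1))
--         for module, paths in path_sets:
--             if not paths.isdisjoint(prefixes):
--                 affected.add(module)
--     return affected
-- ===== Notes on version B (the rewrite author's own statement) =====
-- stated objective: alternative
-- what changed: B precomputes a hash set of paths per module and tests membership of each file's prefixes, replacing A's inner scan over every path with startswith.
import Mathlib
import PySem

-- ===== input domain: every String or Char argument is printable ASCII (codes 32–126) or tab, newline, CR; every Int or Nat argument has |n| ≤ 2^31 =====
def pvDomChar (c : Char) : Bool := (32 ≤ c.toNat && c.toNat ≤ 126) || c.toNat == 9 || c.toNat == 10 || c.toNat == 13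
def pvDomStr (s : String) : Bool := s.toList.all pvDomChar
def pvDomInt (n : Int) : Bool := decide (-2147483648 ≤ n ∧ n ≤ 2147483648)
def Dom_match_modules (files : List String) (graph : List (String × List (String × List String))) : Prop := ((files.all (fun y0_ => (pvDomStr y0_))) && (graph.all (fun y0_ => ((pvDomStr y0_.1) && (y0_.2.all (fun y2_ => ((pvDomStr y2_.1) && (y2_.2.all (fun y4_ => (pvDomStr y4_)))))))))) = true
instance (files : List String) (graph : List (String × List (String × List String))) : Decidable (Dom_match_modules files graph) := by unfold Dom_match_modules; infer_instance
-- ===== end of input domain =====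

-- B builds a per-module path set once and matches each file by intersecting the set of its (length-capped) prefixes, instead of scanning every path with startswith; alternative traversal, same result.


-- ===== PORT A =====
-- inner 'for path in ...: if f.startswith(path): affected.add(module); break'
def pvLoopPathsA (f : String) (paths : List String) (module : String) (acc : PySem.Set String) : PySem.Set String :=
  match paths with
  | [] => acc
  | p :: rest =>
      if PySem.Str.startswith f p then PySem.Set.add acc module
      else pvLoopPathsA f rest module acc

def match_modules (files : List String) (graph : List (String × List (String × List String))) : List String :=
  files.foldl (fun affected f =>
    graph.foldl (fun affected md =>
      pvLoopPathsA f (PySem.Dict.getD (PySem.Dict.mk md.2) "paths" []) md.1 affected) affected)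
    PySem.Set.empty

-- ===== PORT B =====
def match_modules_alt (files : List String) (graph : List (String × List (String × List String))) : List String :=
  let pathSets : List (String × PySem.Set String) :=
    graph.map (fun md => (md.1, PySem.Set.ofList (PySem.Dict.getD (PySem.Dict.mk md.2) "paths" [])))
  let maxlen : Int :=
    pathSets.foldl (fun m mp => mp.2.foldl (fun m p => max m (PySem.Str.len p)) m) (-1)
  files.foldl (fun affected f =>
    let prefixes : PySem.Set String :=
      PySem.Set.ofList ((PySem.List.pyRange 0 (min (PySem.Str.len f) maxlen + 1) 1).map
        (fun i => PySem.Str.slice f (some 0) (some i)))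
    pathSets.foldl (fun affected mp =>
      if !(PySem.Set.isdisjoint mp.2 prefixes) then PySem.Set.add affected mp.1
      else affected) affected)
    PySem.Set.empty

-- ===== PRECONDITION & SPEC =====
def Spec_match_modules (files : List String) (graph : List (String × List (String × List String))) (out : List String) : Prop := out = match_modules_alt files graph
instance (files : List String) (graph : List (String × List (String × List String))) (out : List String) : Decidable (Spec_match_modules files graph out) := by unfold Spec_match_modules; infer_instance

-- ===== CLAIM (what is proved, stated in full; the proofs are below) =====
def Claim_equal_match_modules : Prop := ∀ (files : List String) (graph : List (String × List (String × List String))), Dom_match_modules files graph → Spec_match_modules files graph (match_modules files graph)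

-- ===== LEMMAS AND PROOFS =====

lemma pv_slice_toList (f : String) (i : Int) (h0 : 0 ≤ i) :
    (PySem.Str.slice f (some 0) (some i)).toList = f.toList.take i.toNat := by
  rw [PySem.Str.toList_slice, PySem.Chars.slice_eq_listSlice, PySem.List.slice_zero_start,
    PySem.List.slice_to _ h0]

lemma pv_str_len_eq (s : String) : PySem.Str.len s = (s.toList.length : Int) := by
  simp [PySem.Str.len_eq]

-- the capped prefix list contains exactly the prefixes of f (of length ≤ maxlen)
lemma pv_mem_prefixes_iff (f p : String) (maxlen : Int)
    (hle : (p.toList.length : Int) ≤ maxlen) :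
    (p ∈ (PySem.List.pyRange 0 (min (PySem.Str.len f) maxlen + 1) 1).map
        (fun i => PySem.Str.slice f (some 0) (some i))) ↔ p.toList <+: f.toList := by
  simp only [List.mem_map, PySem.List.mem_pyRange_one]
  constructor
  · rintro ⟨i, ⟨h0, _⟩, rfl⟩
    rw [pv_slice_toList f i h0]
    exact List.take_prefix _ _
  · intro hp
    refine ⟨(p.toList.length : Int), ⟨by positivity, ?_⟩, ?_⟩
    · have h := hp.length_le
      rw [pv_str_len_eq]
      omega
    · apply String.toList_inj.mp
      rw [pv_slice_toList _ _ (by positivity)]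
      rw [Int.toNat_natCast, ← List.prefix_iff_eq_take.mp hp]

-- every iterated maximum dominates its initial value
lemma pv_init_le_foldl_max (xs : List String) (init : Int) :
    init ≤ xs.foldl (fun m p => max m (PySem.Str.len p)) init := by
  induction xs generalizing init with
  | nil => exact le_refl _
  | cons x xs ih => exact le_trans (le_max_left _ _) (ih _)

lemma pv_mem_le_foldl_max (xs : List String) (init : Int) (p : String) (hp : p ∈ xs) :
    PySem.Str.len p ≤ xs.foldl (fun m q => max m (PySem.Str.len q)) init := by
  induction xs generalizing init with
  | nil => cases hp
  | cons x xs ih =>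
      rcases List.mem_cons.mp hp with h | h
      · subst h
        exact le_trans (le_max_right _ _) (pv_init_le_foldl_max _ _)
      · exact ih _ h

lemma pv_nested_init_le (l : List (String × PySem.Set String)) (init : Int) :
    init ≤ l.foldl (fun m mp => mp.2.foldl (fun m p => max m (PySem.Str.len p)) m) init := by
  induction l generalizing init with
  | nil => exact le_refl _
  | cons x xs ih => exact le_trans (pv_init_le_foldl_max _ _) (ih _)

-- maxlen dominates the length of every path of every module
lemma pv_len_le_maxlen (l : List (String × PySem.Set String)) (init : Int)
    (mp : String × PySem.Set String) (hmp : mp ∈ l) (p : String) (hp : p ∈ mp.2) :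
    PySem.Str.len p ≤ l.foldl (fun m mp => mp.2.foldl (fun m p => max m (PySem.Str.len p)) m) init := by
  induction l generalizing init with
  | nil => cases hmp
  | cons x xs ih =>
      rcases List.mem_cons.mp hmp with h | h
      · subst h
        exact le_trans (pv_mem_le_foldl_max _ _ _ hp) (pv_nested_init_le _ _)
      · exact ih _ h

-- B's disjointness probe equals A's startswith scan (given the length cap)
lemma pv_probe_eq (f : String) (paths : List String) (maxlen : Int)
    (hmax : ∀ p ∈ paths, PySem.Str.len p ≤ maxlen) :
    (!(PySem.Set.isdisjoint (PySem.Set.ofList paths)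
        (PySem.Set.ofList ((PySem.List.pyRange 0 (min (PySem.Str.len f) maxlen + 1) 1).map
          (fun i => PySem.Str.slice f (some 0) (some i))))))
      = paths.any (fun p => PySem.Str.startswith f p) := by
  rw [Bool.eq_iff_iff]
  simp only [Bool.not_eq_eq_eq_not, Bool.not_true, List.any_eq_true,
    PySem.Str.startswith_eq, PySem.Chars.startswith_iff]
  rw [← Bool.not_eq_true, PySem.Set.isdisjoint_iff]
  push Not
  simp only [PySem.Set.mem_ofList]
  constructor
  · rintro ⟨p, hin, hpr⟩
    have hle : (p.toList.length : Int) ≤ maxlen := by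
      have := hmax p hin; rwa [pv_str_len_eq] at this
    exact ⟨p, hin, (pv_mem_prefixes_iff f p maxlen hle).mp hpr⟩
  · rintro ⟨p, hin, hpre⟩
    have hle : (p.toList.length : Int) ≤ maxlen := by
      have := hmax p hin; rwa [pv_str_len_eq] at this
    exact ⟨p, hin, (pv_mem_prefixes_iff f p maxlen hle).mpr hpre⟩

-- A's break-loop is the conditional add
lemma pv_loopPathsA_eq (f : String) (paths : List String) (module : String) (acc : PySem.Set String) :
    pvLoopPathsA f paths module acc
      = if paths.any (fun p => PySem.Str.startswith f p) then PySem.Set.add acc module else acc := by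
  induction paths with
  | nil => simp [pvLoopPathsA]
  | cons p rest ih =>
      simp only [pvLoopPathsA, List.any_cons, Bool.or_eq_true, ih, PySem.Str.startswith_eq,
        List.any_eq_true]
      by_cases h : PySem.Chars.startswith f.toList p.toList = true <;> simp [h]

-- ===== VERDICT (by name: the statement is the Claim_ definition above) =====
theorem match_modules_spec : Claim_equal_match_modules := by
  intro files graph _
  unfold Spec_match_modules match_modules match_modules_alt
  dsimp only
  refine PySem.List.foldl_congr_mem files _ _ _ ?_
  intro acc f _
  rw [List.foldl_map]
  refine PySem.List.foldl_congr_mem graph _ _ _ ?_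
  intro acc2 md hmd
  rw [pv_loopPathsA_eq, ← pv_probe_eq f _ _ ?_]
  intro p hp
  refine pv_len_le_maxlen _ (-1)
    (md.1, PySem.Set.ofList (PySem.Dict.getD (PySem.Dict.mk md.2) "paths" [])) ?_ p ?_
  · exact List.mem_map_of_mem hmd
  · simpa [PySem.Set.mem_ofList] using hp
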